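-- pv_equiv track=rewrite | github.com/nelsonym/uploadLISDB | convertnavbak.py | normalize_config_values
-- ===== SOURCE A (Python) =====
-- from typing import Callable, Dict, List, Optional, Sequence, Tuple
--
-- DEFAULT_PROC = 0
--
-- DEFAULT_TOT_ROWS = 500
--
-- DEFAULT_INSERT_PREFIX = "ins_"
--
-- DEFAULT_DB_PORT = 3306
--
-- CONFIG_KEYS = [
--     "input",
--     "proc",
--     "one_struct",
--     "tot_rows",
--     "insert_prefix",
--     "db_host",
--     "db_user",
--     "db_pw",
--     "db_port",
--     "db_name",
-- ]
--
-- def normalize_config_values(config: Dict[str, str]) -> Dict[str, str]: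
--     normalized = {key: config.get(key, "") for key in CONFIG_KEYS}
--     if not normalized["proc"]:
--         normalized["proc"] = str(DEFAULT_PROC)
--     if not normalized["tot_rows"]:
--         normalized["tot_rows"] = str(DEFAULT_TOT_ROWS)
--     if not normalized["insert_prefix"]:
--         normalized["insert_prefix"] = DEFAULT_INSERT_PREFIX
--     if not normalized["db_port"]:
--         normalized["db_port"] = str(DEFAULT_DB_PORT)
--     return normalized
-- ===== SOURCE B (Python) =====
-- TEMPLATE = {
--     "input": "",
--     "proc": "0",
--     "one_struct": "",
--     "tot_rows": "500",
--     "insert_prefix": "ins_",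
--     "db_host": "",
--     "db_user": "",
--     "db_pw": "",
--     "db_port": "3306",
--     "db_name": "",
-- }
--
-- def normalize_config_values(config):
--     normalized = dict(TEMPLATE)
--     for key, value in config.items():
--         if key in normalized and value:
--             normalized[key] = value
--     return normalized
-- ===== Notes on version B (the rewrite author's own statement) =====
-- stated objective: alternative
-- what changed: B inverts the traversal: it starts from a prefilled TEMPLATE dict (the four defaults plus empty strings for the other keys) and makes one pass over the INPUT dict, overwriting a template entry only when the key is a known config key and the value is truthy, instead of A's pass over CONFIG_KEYS followed by four if-guarded default patch-ups.
import Mathlib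
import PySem

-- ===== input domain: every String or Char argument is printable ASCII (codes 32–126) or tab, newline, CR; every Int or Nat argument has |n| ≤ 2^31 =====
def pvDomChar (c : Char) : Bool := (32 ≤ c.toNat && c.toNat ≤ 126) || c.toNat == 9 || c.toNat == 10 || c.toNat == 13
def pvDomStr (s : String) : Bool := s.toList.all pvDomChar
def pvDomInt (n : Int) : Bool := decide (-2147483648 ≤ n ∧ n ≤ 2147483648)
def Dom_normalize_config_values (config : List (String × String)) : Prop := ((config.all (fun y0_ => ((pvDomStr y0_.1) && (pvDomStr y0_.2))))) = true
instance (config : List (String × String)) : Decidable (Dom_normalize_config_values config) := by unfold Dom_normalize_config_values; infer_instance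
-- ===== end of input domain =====

-- B inverts the traversal: it starts from a prefilled TEMPLATE dict and makes one pass over the
-- INPUT dict overwriting template entries with truthy values, instead of A's pass over CONFIG_KEYS
-- followed by four if-guarded default patch-ups (objective: alternative, same cost).
-- Dicts are ported as insertion-ordered association lists (lookup = first match).

-- ===== PORT A =====
def CONFIG_KEYS : List String :=
  ["input", "proc", "one_struct", "tot_rows", "insert_prefix",
   "db_host", "db_user", "db_pw", "db_port", "db_name"]

-- config.get(key, "")  (first match in the association list, Python dict lookup)
def cfgGet (config : List (String × String)) (k : String) : String :=
  PySem.Dict.getD (PySem.Dict.mk config) k ""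

-- d[k] (k known to be a key of d)
def dGet (d : List (String × String)) (k : String) : String :=
  ((d.find? (fun p => p.1 == k)).map Prod.snd).getD ""

-- d[k] = v for a key already present (overwrite in place, Python dict assignment)
def dSet (d : List (String × String)) (k v : String) : List (String × String) :=
  d.map (fun p => if p.1 == k then (k, v) else p)

def normalize_config_values (config : List (String × String)) : List (String × String) :=
  -- normalized = {key: config.get(key, "") for key in CONFIG_KEYS}
  let normalized := CONFIG_KEYS.map (fun k => (k, cfgGet config k))
  -- if not normalized["proc"]: normalized["proc"] = str(DEFAULT_PROC)
  let normalized := if dGet normalized "proc" == "" then dSet normalized "proc" (PySem.Int.toStr 0) else normalized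
  -- if not normalized["tot_rows"]: normalized["tot_rows"] = str(DEFAULT_TOT_ROWS)
  let normalized := if dGet normalized "tot_rows" == "" then dSet normalized "tot_rows" (PySem.Int.toStr 500) else normalized
  -- if not normalized["insert_prefix"]: normalized["insert_prefix"] = DEFAULT_INSERT_PREFIX
  let normalized := if dGet normalized "insert_prefix" == "" then dSet normalized "insert_prefix" "ins_" else normalized
  -- if not normalized["db_port"]: normalized["db_port"] = str(DEFAULT_DB_PORT)
  let normalized := if dGet normalized "db_port" == "" then dSet normalized "db_port" (PySem.Int.toStr 3306) else normalized
  normalized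

-- ===== PORT B =====
def TEMPLATE : List (String × String) :=
  [("input", ""), ("proc", "0"), ("one_struct", ""), ("tot_rows", "500"),
   ("insert_prefix", "ins_"), ("db_host", ""), ("db_user", ""), ("db_pw", ""),
   ("db_port", "3306"), ("db_name", "")]

-- config.items(): a Python dict has each key once; under the convention (lookup = first match)
-- the items of the dict an association list represents are the first occurrence of each key.
def canonGo : List (String × String) → List String → List (String × String)
  | [], _ => []
  | (k, v) :: rest, seen =>
      if k ∈ seen then canonGo rest seen else (k, v) :: canonGo rest (k :: seen)

def canonItems (l : List (String × String)) : List (String × String) := canonGo l []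

-- 'key in normalized' (Python dict membership)
def dHasKey (d : List (String × String)) (k : String) : Bool :=
  d.any (fun p => p.1 == k)

def normalize_config_values_alt (config : List (String × String)) : List (String × String) :=
  -- normalized = dict(TEMPLATE); for key, value in config.items(): if key in normalized and value: normalized[key] = value
  (canonItems config).foldl
    (fun acc kv => if dHasKey acc kv.1 && kv.2 != "" then dSet acc kv.1 kv.2 else acc)
    TEMPLATE

-- ===== PRECONDITION & SPEC =====
def Spec_normalize_config_values (config : List (String × String)) (out : List (String × String)) : Prop := out = normalize_config_values_alt config
instance (config : List (String × String)) (out : List (String × String)) : Decidable (Spec_normalize_config_values config out) := by unfold Spec_normalize_config_values; infer_instance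

-- ===== CLAIM (what is proved, stated in full; the proofs are below) =====
def Claim_equal_normalize_config_values : Prop := ∀ (config : List (String × String)), Dom_normalize_config_values config → Spec_normalize_config_values config (normalize_config_values config)

-- ===== LEMMAS AND PROOFS =====

-- template default values as a function of the key
def tmplVal (k : String) : String :=
  if k = "proc" then "0" else if k = "tot_rows" then "500"
  else if k = "insert_prefix" then "ins_" else if k = "db_port" then "3306" else ""

-- the overwrite effect of B's loop, as a function transformer
def ov : List (String × String) → (String → String) → String → String
  | [], g => g
  | (k', v) :: ys, g => ov ys (fun k => if k = k' ∧ v ≠ "" then v else g k)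

lemma tmpl_eq_map : TEMPLATE = CONFIG_KEYS.map (fun k => (k, tmplVal k)) := by decide

lemma dSet_map (g : String → String) (k' v : String) :
    dSet (CONFIG_KEYS.map (fun k => (k, g k))) k' v
      = CONFIG_KEYS.map (fun k => (k, if k = k' then v else g k)) := by
  simp only [dSet, List.map_map]
  refine List.map_congr_left (fun k _ => ?_)
  by_cases h : k = k' <;> simp [h]

lemma dHasKey_map (g : String → String) (k' : String) :
    dHasKey (CONFIG_KEYS.map (fun k => (k, g k))) k' = decide (k' ∈ CONFIG_KEYS) := by
  simp only [dHasKey, List.any_map, Function.comp_def]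
  rw [List.any_beq']
  simp

lemma ov_congr (ys : List (String × String)) (g g' : String → String) (k : String)
    (h : g k = g' k) : ov ys g k = ov ys g' k := by
  induction ys generalizing g g' with
  | nil => exact h
  | cons p ys ih =>
      obtain ⟨k', v⟩ := p
      simp only [ov]
      apply ih
      by_cases hk : k = k' ∧ v ≠ "" <;> simp [hk, h]

lemma loop_map (ys : List (String × String)) (g : String → String) :
    ys.foldl (fun acc kv => if dHasKey acc kv.1 && kv.2 != "" then dSet acc kv.1 kv.2 else acc)
        (CONFIG_KEYS.map (fun k => (k, g k)))
      = CONFIG_KEYS.map (fun k => (k, ov ys g k)) := by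
  induction ys generalizing g with
  | nil => simp [ov]
  | cons p ys ih =>
      obtain ⟨k', v⟩ := p
      simp only [List.foldl_cons, ov]
      by_cases hm : k' ∈ CONFIG_KEYS
      · by_cases hv : v = ""
        · subst hv
          simp only [dHasKey_map, hm, decide_true, bne_self_eq_false, Bool.and_false,
                     if_neg Bool.false_ne_true]
          rw [ih]
          refine List.map_congr_left (fun k _ => ?_)
          refine congrArg (Prod.mk k) (ov_congr _ _ _ _ ?_)
          simp
        · simp only [dHasKey_map, hm, decide_true, Bool.true_and]
          rw [if_pos (by simpa using hv), dSet_map, ih]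
          refine List.map_congr_left (fun k _ => ?_)
          refine congrArg (Prod.mk k) (ov_congr _ _ _ _ ?_)
          by_cases hk : k = k' <;> simp [hk, hv]
      · simp only [dHasKey_map, hm, decide_false, Bool.false_and, if_neg Bool.false_ne_true]
        rw [ih]
        refine List.map_congr_left (fun k hk => ?_)
        refine congrArg (Prod.mk k) (ov_congr _ _ _ _ ?_)
        have hne : k ≠ k' := fun h => hm (h ▸ hk)
        simp [hne]

lemma ov_not_mem (ys : List (String × String)) (g : String → String) (k : String)
    (h : ∀ p ∈ ys, p.1 ≠ k) : ov ys g k = g k := by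
  induction ys generalizing g with
  | nil => rfl
  | cons p ys ih =>
      obtain ⟨k', v⟩ := p
      simp only [ov]
      rw [ih _ (fun q hq => h q (List.mem_cons_of_mem _ hq))]
      have hne : k ≠ k' := fun hkk => h (k', v) List.mem_cons_self (by simp [hkk])
      simp [hne]

lemma ov_lookup (ys : List (String × String)) (g : String → String) (k : String)
    (hnd : (ys.map Prod.fst).Nodup) :
    ov ys g k = match ys.find? (fun p => p.1 == k) with
                | some p => if p.2 = "" then g k else p.2
                | none => g k := by
  induction ys generalizing g with
  | nil => rfl
  | cons p ys ih =>
      obtain ⟨k', v⟩ := p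
      simp only [List.map_cons, List.nodup_cons] at hnd
      by_cases hk : k' = k
      · subst hk
        rw [List.find?_cons_of_pos (by simp)]
        simp only [ov]
        rw [ov_not_mem ys _ k' (fun q hq hq1 => hnd.1 (hq1 ▸ List.mem_map_of_mem hq))]
        by_cases hv : v = "" <;> simp [hv]
      · rw [List.find?_cons_of_neg (by simp [hk])]
        simp only [ov]
        rw [ih _ hnd.2]
        have hg : (fun x => if x = k' ∧ v ≠ "" then v else g x) k = g k := by
          simp [show k ≠ k' from fun h => hk h.symm]
        rcases hf : ys.find? (fun p => p.1 == k) with _ | q <;> simp [hg]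

lemma canonGo_keys (ys : List (String × String)) (seen : List String) (x : String)
    (hx : x ∈ (canonGo ys seen).map Prod.fst) : x ∉ seen := by
  induction ys generalizing seen with
  | nil => simp [canonGo] at hx
  | cons p rest ih =>
      obtain ⟨k, v⟩ := p
      rw [canonGo] at hx
      by_cases h : k ∈ seen
      · exact ih _ (by simpa [h] using hx)
      · rw [if_neg h, List.map_cons] at hx
        rcases List.mem_cons.mp hx with h1 | h1
        · exact h1 ▸ h
        · intro hs
          exact ih _ h1 (List.mem_cons_of_mem _ hs)

lemma canonGo_nodup (ys : List (String × String)) (seen : List String) :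
    ((canonGo ys seen).map Prod.fst).Nodup := by
  induction ys generalizing seen with
  | nil => simp [canonGo]
  | cons p rest ih =>
      obtain ⟨k, v⟩ := p
      rw [canonGo]
      by_cases h : k ∈ seen
      · simpa [h] using ih seen
      · simp only [h, if_false, List.map_cons, List.nodup_cons]
        exact ⟨fun hmem => canonGo_keys _ _ _ hmem List.mem_cons_self, ih _⟩

lemma canon_nodup (ys : List (String × String)) : ((canonItems ys).map Prod.fst).Nodup :=
  canonGo_nodup ys []

lemma canonGo_find? (ys : List (String × String)) (seen : List String) (k : String)
    (hk : k ∉ seen) :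
    (canonGo ys seen).find? (fun p => p.1 == k) = ys.find? (fun p => p.1 == k) := by
  induction ys generalizing seen with
  | nil => rw [canonGo]
  | cons p rest ih =>
      obtain ⟨k', v⟩ := p
      rw [canonGo]
      by_cases h : k' = k
      · subst h
        rw [if_neg hk, List.find?_cons_of_pos (by simp), List.find?_cons_of_pos (by simp)]
      · rw [List.find?_cons_of_neg (by simp [h])]
        by_cases hs : k' ∈ seen
        · rw [if_pos hs, ih _ hk]
        · rw [if_neg hs, List.find?_cons_of_neg (by simp [h]),
              ih _ (by simp [hk, show ¬k = k' from fun hh => h hh.symm])]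

lemma canon_find? (ys : List (String × String)) (k : String) :
    (canonItems ys).find? (fun p => p.1 == k) = ys.find? (fun p => p.1 == k) :=
  canonGo_find? ys [] k (by simp)

-- what both programs read at a key: first-match lookup in the input association list
lemma cfgGet_find? (config : List (String × String)) (k : String) :
    cfgGet config k = ((config.find? (fun p => p.1 == k)).map Prod.snd).getD "" := by
  induction config with
  | nil => rfl
  | cons p rest ih =>
      obtain ⟨k', v⟩ := p
      rw [cfgGet, PySem.Dict.getD_eq_get?_getD, PySem.Dict.get?_mk_cons]
      by_cases h : k' = k
      · rw [List.find?_cons_of_pos (by simp [h])]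
        simp [h]
      · rw [if_neg (by simpa using h), List.find?_cons_of_neg (by simp [h]),
            ← PySem.Dict.getD_eq_get?_getD]
        exact ih

lemma alt_eq (config : List (String × String)) :
    normalize_config_values_alt config
      = CONFIG_KEYS.map (fun k => (k, if cfgGet config k = "" then tmplVal k else cfgGet config k)) := by
  rw [normalize_config_values_alt, tmpl_eq_map, loop_map]
  refine List.map_congr_left (fun k _ => ?_)
  refine congrArg (Prod.mk k) ?_
  rw [ov_lookup _ _ _ (canon_nodup config), canon_find?, cfgGet_find?]
  rcases hf : config.find? (fun p => p.1 == k) with _ | q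
  · rw [hf]
    simp
  · rw [hf]
    by_cases hq : q.2 = "" <;> simp [hq]

-- ===== VERDICT (by name: the statement is the Claim_ definition above) =====
theorem normalize_config_values_spec : Claim_equal_normalize_config_values := by
  intro config _
  unfold Spec_normalize_config_values
  rw [alt_eq]
  unfold normalize_config_values
  simp only [CONFIG_KEYS, List.map, dGet, dSet, List.find?]
  by_cases h1 : cfgGet config "proc" = "" <;>
  by_cases h2 : cfgGet config "tot_rows" = "" <;>
  by_cases h3 : cfgGet config "insert_prefix" = "" <;>
  by_cases h4 : cfgGet config "db_port" = "" <;>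
    simp [h1, h2, h3, h4, tmplVal] <;> decide
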